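-- pv_equiv track=rewrite | github.com/posl/comment_recommendation | script/mod_gen/2_time/zh/135_D/9.py | solve
-- ===== SOURCE A (Python) =====
-- def solve(s):
--     mod = 10 ** 9 + 7
--     dp = [0] * 13
--     dp[0] = 1
--     for c in s:
--         if c == '?':
--             dp = [sum(dp[(j - k) % 13] for k in range(10)) % mod for j in range(13)]
--         else:
--             dp = [dp[(j - int(c)) % 13] for j in range(13)]
--     return dp[5]
-- ===== SOURCE B (Python) =====
-- def solve(s):
--     mod = 10 ** 9 + 7
--     S = 0
--     q = 0
--     for c in s:
--         if c == '?':
--             q += 1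
--         else:
--             S += int(c)
--     dp = [0] * 13
--     dp[0] = 1
--     for _ in range(q):
--         dp = [sum(dp[(j - k) % 13] for k in range(10)) % mod for j in range(13)]
--     return dp[(5 - S) % 13]
-- ===== Notes on version B (the rewrite author's own statement) =====
-- stated objective: alternative
-- what changed: All per-character updates commute on the 13-residue array, so B collapses every fixed digit into one summed shift S (a single cheap integer pass) and runs the expensive wildcard convolution only q = #'?' times, returning dp[(5 - S) % 13] instead of rebuilding the 13-list for each digit.
import Mathlib
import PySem

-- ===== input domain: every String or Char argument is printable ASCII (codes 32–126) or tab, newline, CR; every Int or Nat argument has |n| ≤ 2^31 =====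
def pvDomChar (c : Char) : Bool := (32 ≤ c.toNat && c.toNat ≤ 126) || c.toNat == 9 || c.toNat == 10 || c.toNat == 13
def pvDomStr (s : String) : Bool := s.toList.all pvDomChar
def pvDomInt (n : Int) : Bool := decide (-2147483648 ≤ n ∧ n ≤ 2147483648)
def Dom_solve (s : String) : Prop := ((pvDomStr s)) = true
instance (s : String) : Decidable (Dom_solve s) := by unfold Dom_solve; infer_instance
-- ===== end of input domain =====

-- B separates the commuting updates: one pass summing the fixed digits (S) and counting '?' (q),
-- then q wildcard convolutions, returning dp[(5 - S) % 13]; A rebuilds the 13-list once per character.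

-- ===== PORT A =====
-- int(c) for a single character c (ValueError, i.e. none, is excluded by Pre_solve)
def pyIntChar (c : Char) : Int := (PySem.Int.ofStr? (String.ofList [c])).getD 0

-- dp[i % 13] — exact: dp always has length 13 and 0 ≤ i % 13 < 13
def idx13 (dp : List Int) (i : Int) : Int := PySem.List.pyGetD dp (PySem.Int.mod i 13) 0

-- the '?' branch: [sum(dp[(j - k) % 13] for k in range(10)) % mod for j in range(13)]
def conv13 (m : Int) (dp : List Int) : List Int :=
  (PySem.List.pyRange 0 13 1).map (fun j =>
    PySem.Int.mod (((PySem.List.pyRange 0 10 1).map (fun k => idx13 dp (j - k))).sum) m)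

-- the digit branch: [dp[(j - int(c)) % 13] for j in range(13)]
def shift13 (dp : List Int) (d : Int) : List Int :=
  (PySem.List.pyRange 0 13 1).map (fun j => idx13 dp (j - d))

def solve (s : String) : Int :=
  let m : Int := 10 ^ 9 + 7
  let dp0 : List Int := (List.replicate 13 (0 : Int)).set 0 1
  let dp := s.toList.foldl
    (fun dp c => if c = '?' then conv13 m dp else shift13 dp (pyIntChar c)) dp0
  PySem.List.pyGetD dp 5 0   -- dp[5]: dp has length 13, so plain indexing is exact

-- ===== PORT B =====
def solve_alt (s : String) : Int :=
  let m : Int := 10 ^ 9 + 7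
  let p := s.toList.foldl
    (fun (p : Int × Int) c => if c = '?' then (p.1, p.2 + 1) else (p.1 + pyIntChar c, p.2))
    (0, 0)
  let dp0 : List Int := (List.replicate 13 (0 : Int)).set 0 1
  let dp := (PySem.List.pyRange 0 p.2 1).foldl (fun dp _ => conv13 m dp) dp0
  idx13 dp (5 - p.1)   -- dp[(5 - S) % 13]

-- ===== PRECONDITION & SPEC =====
-- Pre_ excludes exactly the strings containing a character that is neither '?' nor a digit,
-- on which A's int(c) raises ValueError.
def Pre_solve (s : String) : Prop := (s.toList.all (fun c => c == '?' || PySem.Chars.isdigit c)) = true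
instance (s : String) : Decidable (Pre_solve s) := by unfold Pre_solve; infer_instance
def pvWitness_solve : String := "1"
def Spec_solve (s : String) (out : Int) : Prop := out = solve_alt s
instance (s : String) (out : Int) : Decidable (Spec_solve s out) := by unfold Spec_solve; infer_instance

-- ===== CLAIM (what is proved, stated in full; the proofs are below) =====
def Claim_equal_solve : Prop := ∀ (s : String), Dom_solve s → Pre_solve s → Spec_solve s (solve s)

-- ===== LEMMAS AND PROOFS =====

lemma mod13_eq (i : Int) : PySem.Int.mod i 13 = i % 13 :=
  PySem.Int.mod_eq_emod_of_pos (by norm_num)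

lemma idx13_congr (dp : List Int) {i i' : Int} (h : i % 13 = i' % 13) :
    idx13 dp i = idx13 dp i' := by
  simp [idx13, h]

lemma idx13_build (f : Int → Int) (i : Int) :
    idx13 ((PySem.List.pyRange 0 13 1).map f) i = f (i % 13) := by
  have h0 : (0 : Int) ≤ i % 13 := Int.emod_nonneg i (by norm_num)
  have h1 : i % 13 < 13 := Int.emod_lt_of_pos i (by norm_num)
  simp only [idx13, mod13_eq]
  exact PySem.List.pyGetD_map_pyRange_of_nonneg f 13 (i % 13) 0 h0 h1



lemma shift_shift (dp : List Int) (a b : Int) :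
    shift13 (shift13 dp a) b = shift13 dp (a + b) := by
  simp only [shift13]
  refine List.map_congr_left (fun j _ => ?_)
  rw [idx13_build]
  exact idx13_congr dp (by omega)

lemma conv_shift (m : Int) (dp : List Int) (a : Int) :
    conv13 m (shift13 dp a) = shift13 (conv13 m dp) a := by
  simp only [conv13, shift13]
  refine List.map_congr_left (fun j _ => ?_)
  rw [idx13_build]
  congr 1
  refine congrArg List.sum (List.map_congr_left (fun k _ => ?_))
  rw [idx13_build]
  exact idx13_congr dp (by omega)

lemma length_shift13 (dp : List Int) (a : Int) : (shift13 dp a).length = 13 := by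
  simp [shift13, PySem.List.length_pyRange_one]

lemma shift13_zero (dp : List Int) (h : dp.length = 13) : shift13 dp 0 = dp := by
  apply List.ext_getElem
  · rw [length_shift13, h]
  · intro n h1 h2
    rw [length_shift13] at h1
    have hn0 : ((n : Int)) % 13 = (n : Int) := by omega
    simp [shift13, PySem.List.getElem_pyRange_one, idx13, hn0,
      List.getD_eq_getElem?_getD, List.getElem?_eq_getElem h2]

-- q iterations of the wildcard convolution (proof-side normal form)
def cpow (m : Int) : Nat → List Int → List Int
  | 0, dp => dp
  | n + 1, dp => conv13 m (cpow m n dp)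

lemma cpow_conv (m : Int) (n : Nat) (dp : List Int) :
    cpow m n (conv13 m dp) = conv13 m (cpow m n dp) := by
  induction n with
  | zero => rfl
  | succ n ih => simp [cpow, ih]

lemma cpow_shift (m : Int) (n : Nat) (dp : List Int) (a : Int) :
    cpow m n (shift13 dp a) = shift13 (cpow m n dp) a := by
  induction n with
  | zero => rfl
  | succ n ih => simp [cpow, ih, conv_shift]


-- (digit sum, '?' count) of a char list, head-first (matches processing order)
def Sq : List Char → Int × Nat
  | [] => (0, 0)
  | c :: cs => if c = '?' then ((Sq cs).1, (Sq cs).2 + 1) else ((Sq cs).1 + pyIntChar c, (Sq cs).2)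

lemma foldA (m : Int) (cs : List Char) (dp : List Int) (h : dp.length = 13) :
    cs.foldl (fun dp c => if c = '?' then conv13 m dp else shift13 dp (pyIntChar c)) dp
      = shift13 (cpow m (Sq cs).2 dp) (Sq cs).1 := by
  induction cs generalizing dp with
  | nil => simp [Sq, cpow, shift13_zero dp h]
  | cons c cs ih =>
    simp only [List.foldl_cons]
    by_cases hc : c = '?'
    · rw [if_pos hc, ih (conv13 m dp) (by simp [conv13, PySem.List.length_pyRange_one])]
      simp [Sq, hc, cpow, cpow_conv]
    · rw [if_neg hc, ih (shift13 dp (pyIntChar c)) (length_shift13 dp _)]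
      rw [cpow_shift, shift_shift]
      simp [Sq, hc, add_comm]

lemma foldB (cs : List Char) (S q : Int) :
    cs.foldl (fun (p : Int × Int) c =>
        if c = '?' then (p.1, p.2 + 1) else (p.1 + pyIntChar c, p.2)) (S, q)
      = (S + (Sq cs).1, q + ((Sq cs).2 : Int)) := by
  induction cs generalizing S q with
  | nil => simp [Sq]
  | cons c cs ih =>
    simp only [List.foldl_cons]
    by_cases hc : c = '?'
    · rw [if_pos hc, ih]
      simp [Sq, hc]; omega
    · rw [if_neg hc, ih]
      simp [Sq, hc]; ring

lemma foldRange (m : Int) (n : Nat) (dp : List Int) :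
    (PySem.List.pyRange 0 (n : Int) 1).foldl (fun dp _ => conv13 m dp) dp = cpow m n dp := by
  induction n with
  | zero => simp [PySem.List.pyRange_one_eq_nil, cpow]
  | succ n ih =>
    have : ((n + 1 : Nat) : Int) = (n : Int) + 1 := by push_cast; ring
    rw [this, PySem.List.pyRange_one_succ_right (by positivity)]
    simp [List.foldl_append, ih, cpow]

lemma dp0_len : ((List.replicate 13 (0 : Int)).set 0 1).length = 13 := by decide

-- ===== VERDICT (by name: the statement is the Claim_ definition above) =====
theorem solve_spec : Claim_equal_solve := by
  intro s _ _
  unfold Spec_solve solve solve_alt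
  simp only []
  rw [foldA _ _ _ dp0_len, foldB]
  dsimp only
  simp only [zero_add]
  rw [foldRange]
  have h5 : PySem.List.pyGetD
      (shift13 (cpow (10 ^ 9 + 7) (Sq s.toList).2 ((List.replicate 13 (0 : Int)).set 0 1))
        (Sq s.toList).1) 5 0
      = idx13 (cpow (10 ^ 9 + 7) (Sq s.toList).2 ((List.replicate 13 (0 : Int)).set 0 1))
          ((5 : Int) - (Sq s.toList).1) := by
    rw [shift13]
    exact PySem.List.pyGetD_map_pyRange_of_nonneg _ 13 5 0 (by norm_num) (by norm_num)
  rw [h5]
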